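-- pv_equiv track=rewrite | github.com/sigjhl/p5 | src/modules/tts_generator.py | _extract_speaker_starts
-- ===== SOURCE A (Python) =====
-- from typing import List, Tuple, Dict
--
-- def _extract_speaker_starts(text: str) -> List[str]:
--     """Extract speakers that start speaking in this chunk."""
--     speakers = []
--     lines = text.split('\n')
--
--     for line in lines:
--         line = line.strip()
--         if line.startswith('Host A:'):
--             if 'Host A' not in speakers:
--                 speakers.append('Host A')
--         elif line.startswith('Host B:'):
--             if 'Host B' not in speakers:
--                 speakers.append('Host B')
--
--     return speakers
-- ===== SOURCE B (Python) =====
-- def _extract_speaker_starts(text):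
--     """Extract speakers that start speaking in this chunk."""
--     lines = [line.strip() for line in text.split('\n')]
--
--     def first_idx(prefix):
--         for i, line in enumerate(lines):
--             if line.startswith(prefix):
--                 return i
--         return None
--
--     pairs = [(idx, name)
--              for idx, name in ((first_idx('Host A:'), 'Host A'),
--                                (first_idx('Host B:'), 'Host B'))
--              if idx is not None]
--     pairs.sort()
--     return [name for _, name in pairs]
-- ===== Notes on version B (the rewrite author's own statement) =====
-- stated objective: alternative
-- what changed: Replaces the in-loop append-on-first-sight with membership dedup by a two-phase structure: find each speaker's first matching line index, then order the found speakers by that index.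
import Mathlib
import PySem

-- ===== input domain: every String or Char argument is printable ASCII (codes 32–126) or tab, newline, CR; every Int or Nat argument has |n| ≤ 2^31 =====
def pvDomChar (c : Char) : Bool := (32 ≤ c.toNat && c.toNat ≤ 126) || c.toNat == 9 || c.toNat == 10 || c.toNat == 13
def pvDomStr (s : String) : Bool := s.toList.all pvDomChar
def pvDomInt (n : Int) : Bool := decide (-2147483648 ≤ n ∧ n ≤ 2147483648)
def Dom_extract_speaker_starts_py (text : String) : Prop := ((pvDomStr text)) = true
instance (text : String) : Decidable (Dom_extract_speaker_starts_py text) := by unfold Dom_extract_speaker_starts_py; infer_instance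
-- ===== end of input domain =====

-- B replaces A's append-on-first-sight loop by a locate-first-indices-then-order two-phase structure (alternative decomposition, same cost).

-- ===== PORT A =====
-- the loop body of A (strip, then the if/elif append-with-dedup chain)
def pvStepA (speakers : List String) (line : List Char) : List String :=
  let line := PySem.Chars.strip line
  if PySem.Chars.startswith line "Host A:".toList then
    if speakers.contains "Host A" then speakers else speakers ++ ["Host A"]
  else if PySem.Chars.startswith line "Host B:".toList then
    if speakers.contains "Host B" then speakers else speakers ++ ["Host B"]
  else speakers

def extract_speaker_starts_py (text : String) : List String :=
  let lines := PySem.Chars.splitOn text.toList "\n".toList   -- text.split('\n'), sep ≠ ''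
  lines.foldl pvStepA []

-- ===== PORT B =====
-- first_idx: index of the first (already stripped) line starting with the prefix, None if absent
def pvFirstIdx (lines : List (List Char)) (pre : List Char) : Option Nat :=
  lines.findIdx? (fun l => PySem.Chars.startswith l pre)

def extract_speaker_starts_py_alt (text : String) : List String :=
  let lines := (PySem.Chars.splitOn text.toList "\n".toList).map PySem.Chars.strip
  let ia := pvFirstIdx lines "Host A:".toList
  let ib := pvFirstIdx lines "Host B:".toList
  -- pairs.sort of the kept (idx, name) tuples: 'Host A' comes first iff ia ≤ ib
  match ia, ib with
  | none, none => []
  | some _, none => ["Host A"]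
  | none, some _ => ["Host B"]
  | some i, some j => if i ≤ j then ["Host A", "Host B"] else ["Host B", "Host A"]

-- ===== PRECONDITION & SPEC =====
def Spec_extract_speaker_starts_py (text : String) (out : List String) : Prop := out = extract_speaker_starts_py_alt text
instance (text : String) (out : List String) : Decidable (Spec_extract_speaker_starts_py text out) := by unfold Spec_extract_speaker_starts_py; infer_instance

-- ===== CLAIM (what is proved, stated in full; the proofs are below) =====
def Claim_equal_extract_speaker_starts_py : Prop := ∀ (text : String), Dom_extract_speaker_starts_py text → Spec_extract_speaker_starts_py text (extract_speaker_starts_py text)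

-- ===== LEMMAS AND PROOFS =====

-- the two line tests (on raw, unstripped lines)
def pvQA (l : List Char) : Bool := PySem.Chars.startswith (PySem.Chars.strip l) "Host A:".toList
def pvQB (l : List Char) : Bool := PySem.Chars.startswith (PySem.Chars.strip l) "Host B:".toList

-- no line can start with both prefixes
theorem pvDisj (l : List Char) : ¬ (pvQA l = true ∧ pvQB l = true) := by
  rintro ⟨ha, hb⟩
  rw [pvQA, PySem.Chars.startswith_iff] at ha
  rw [pvQB, PySem.Chars.startswith_iff] at hb
  rcases List.prefix_or_prefix_of_prefix ha hb with h | h <;> revert h <;> decide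

theorem pvStepA_eq (acc : List String) (l : List Char) :
    pvStepA acc l =
      if pvQA l then (if acc.contains "Host A" then acc else acc ++ ["Host A"])
      else if pvQB l then (if acc.contains "Host B" then acc else acc ++ ["Host B"])
      else acc := rfl

theorem pvNotBoth (l : List Char) (h : pvQA l = true) : pvQB l = false := by
  by_cases hb : pvQB l = true
  · exact absurd ⟨h, hb⟩ (pvDisj l)
  · simpa using hb

-- once both speakers are present, the fold is the identity
theorem pvFold_AB (L : List (List Char)) (acc : List String)
    (hA : acc.contains "Host A" = true) (hB : acc.contains "Host B" = true) :
    L.foldl pvStepA acc = acc := by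
  induction L with
  | nil => rfl
  | cons l rest ih =>
    have hstep : pvStepA acc l = acc := by
      rw [pvStepA_eq, hA, hB]; split_ifs <;> simp_all
    rw [List.foldl_cons, hstep, ih]

-- fold from ["Host A"]: appends "Host B" iff some later line matches B
theorem pvFold_A (L : List (List Char)) :
    L.foldl pvStepA ["Host A"] =
      match L.findIdx? pvQB with
      | none => ["Host A"]
      | some _ => ["Host A", "Host B"] := by
  induction L with
  | nil => rfl
  | cons l rest ih =>
    rw [List.foldl_cons, List.findIdx?_cons]
    by_cases hb : pvQB l = true
    · have ha : pvQA l = false := by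
        by_cases h : pvQA l = true
        · exact absurd ⟨h, hb⟩ (pvDisj l)
        · simpa using h
      have hstep : pvStepA ["Host A"] l = ["Host A", "Host B"] := by
        rw [pvStepA_eq, ha, hb]; rfl
      rw [hstep, hb, if_pos rfl, pvFold_AB rest _ (by decide) (by decide)]
    · have hb' : pvQB l = false := by simpa using hb
      rw [hb']
      by_cases ha : pvQA l = true
      · have hstep : pvStepA ["Host A"] l = ["Host A"] := by
          rw [pvStepA_eq, ha]; rfl
        rw [hstep, ih]; cases rest.findIdx? pvQB <;> simp
      · have ha' : pvQA l = false := by simpa using ha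
        have hstep : pvStepA ["Host A"] l = ["Host A"] := by
          rw [pvStepA_eq, ha', hb']; rfl
        rw [hstep, ih]; cases rest.findIdx? pvQB <;> simp

-- fold from ["Host B"]: appends "Host A" iff some later line matches A
theorem pvFold_B (L : List (List Char)) :
    L.foldl pvStepA ["Host B"] =
      match L.findIdx? pvQA with
      | none => ["Host B"]
      | some _ => ["Host B", "Host A"] := by
  induction L with
  | nil => rfl
  | cons l rest ih =>
    rw [List.foldl_cons, List.findIdx?_cons]
    by_cases ha : pvQA l = true
    · have hstep : pvStepA ["Host B"] l = ["Host B", "Host A"] := by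
        rw [pvStepA_eq, ha]; rfl
      rw [hstep, ha, if_pos rfl, pvFold_AB rest _ (by decide) (by decide)]
    · have ha' : pvQA l = false := by simpa using ha
      rw [ha']
      by_cases hb : pvQB l = true
      · have hstep : pvStepA ["Host B"] l = ["Host B"] := by
          rw [pvStepA_eq, ha', hb]; rfl
        rw [hstep, ih]; cases rest.findIdx? pvQA <;> simp
      · have hb' : pvQB l = false := by simpa using hb
        have hstep : pvStepA ["Host B"] l = ["Host B"] := by
          rw [pvStepA_eq, ha', hb']; rfl
        rw [hstep, ih]; cases rest.findIdx? pvQA <;> simp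

-- the main characterisation of A's fold from the empty accumulator
theorem pvFold_main (L : List (List Char)) :
    L.foldl pvStepA [] =
      match L.findIdx? pvQA, L.findIdx? pvQB with
      | none, none => []
      | some _, none => ["Host A"]
      | none, some _ => ["Host B"]
      | some i, some j => if i ≤ j then ["Host A", "Host B"] else ["Host B", "Host A"] := by
  induction L with
  | nil => rfl
  | cons l rest ih =>
    rw [List.foldl_cons, List.findIdx?_cons, List.findIdx?_cons]
    by_cases ha : pvQA l = true
    · have hb : pvQB l = false := pvNotBoth l ha
      have hstep : pvStepA [] l = ["Host A"] := by
        rw [pvStepA_eq, ha]; rfl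
      rw [hstep, ha, hb, if_pos rfl, pvFold_A rest]
      cases rest.findIdx? pvQB <;> simp
    · have ha' : pvQA l = false := by simpa using ha
      rw [ha']
      by_cases hb : pvQB l = true
      · have hstep : pvStepA [] l = ["Host B"] := by
          rw [pvStepA_eq, ha', hb]; rfl
        rw [hstep, hb, if_pos rfl, pvFold_B rest]
        cases rest.findIdx? pvQA <;> simp
      · have hb' : pvQB l = false := by simpa using hb
        have hstep : pvStepA [] l = [] := by
          rw [pvStepA_eq, ha', hb']; rfl
        rw [hstep, hb', ih]
        cases rest.findIdx? pvQA <;> cases rest.findIdx? pvQB <;> simp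

-- findIdx? over the stripped lines = findIdx? of the strip-composed test on raw lines
theorem pvFirstIdx_map (lines : List (List Char)) (pre : List Char) :
    pvFirstIdx (lines.map PySem.Chars.strip) pre =
      lines.findIdx? (fun l => PySem.Chars.startswith (PySem.Chars.strip l) pre) := by
  rw [pvFirstIdx, List.findIdx?_map]; rfl

-- ===== VERDICT (by name: the statement is the Claim_ definition above) =====
theorem extract_speaker_starts_py_spec : Claim_equal_extract_speaker_starts_py := by
  intro text _
  unfold Spec_extract_speaker_starts_py extract_speaker_starts_py extract_speaker_starts_py_alt
  dsimp only
  rw [pvFirstIdx_map, pvFirstIdx_map]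
  exact pvFold_main (PySem.Chars.splitOn text.toList "\n".toList)
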